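-- pv_equiv track=rewrite | github.com/wesselb/neuralprocesses | neuralprocesses/coders/setconv/util.py | with_first_last
-- ===== SOURCE A (Python) =====
-- def with_first_last(xs):
--     """Return a generator which indicates whether the returned element is the first or
--     last.
--
--     Args:
--         xs: Generator to wrap.
--
--     Yields:
--         bool: Element is first.
--         bool: Element is last.
--         object: Element.
--     """
--     state = {"first": True}
--
--     def first():
--         if state["first"]:
--             state["first"] = False
--             return True
--         else:
--             return False
--
--     prev = None
--     have_prev = False
--
--     cur = None
--     have_cur = False
--
--     for x in xs:
--         cur = x
--         have_cur = True
--
--         if not have_prev: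
--             # We will need a `prev`, but there is no `prev` yet. Take the current one as
--             # `prev` and skip to the next iteration.
--             prev = cur
--             have_prev = True
--             continue
--
--         # We currently have available `prev` and `cur`. We will return `prev` and,
--         # after the loop has finished, return `cur` as the last one.
--         yield first(), False, prev
--
--         prev = cur
--
--     if have_cur:
--         yield first(), True, cur
-- ===== SOURCE B (Python) =====
-- def with_first_last(xs):
--     """Return a generator which indicates whether the returned element is the first or
--     last.
--
--     Note: materializes ``xs`` into a list first (not lazy), so the length is known
--     and each element's flags are computed from its index.
--     """
--     xs = list(xs)
--     n = len(xs)
--     for i, x in enumerate(xs):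
--         yield i == 0, i == n - 1, x
-- ===== Notes on version B (the rewrite author's own statement) =====
-- stated objective: simpler
-- what changed: Materializes the input and computes each element's (first,last) flags from its index against the known length, eliminating the one-step lookahead, the state dict and the first() closure entirely; B is not lazy (it consumes the generator up front).
import Mathlib
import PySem

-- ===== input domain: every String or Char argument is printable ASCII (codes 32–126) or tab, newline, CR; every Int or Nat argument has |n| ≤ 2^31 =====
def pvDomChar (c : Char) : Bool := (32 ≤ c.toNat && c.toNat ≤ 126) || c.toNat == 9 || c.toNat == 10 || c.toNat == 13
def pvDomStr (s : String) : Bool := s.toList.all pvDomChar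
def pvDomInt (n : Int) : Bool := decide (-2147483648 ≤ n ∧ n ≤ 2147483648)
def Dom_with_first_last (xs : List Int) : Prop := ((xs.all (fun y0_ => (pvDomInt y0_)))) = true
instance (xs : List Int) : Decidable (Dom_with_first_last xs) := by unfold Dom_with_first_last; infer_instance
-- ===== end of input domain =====

-- B materializes the input and derives each element's (first,last) flags from its index and the length,
-- replacing A's lookahead/state-dict bookkeeping (simpler; B consumes the generator up front, i.e. is not lazy).


-- ===== PORT A =====
-- State of A's loop: (state["first"], prev, have_prev, cur, have_cur, yielded-so-far).
def aStep (s : Bool × Option Int × Bool × Option Int × Bool × List (Bool × Bool × Int)) (x : Int) :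
    Bool × Option Int × Bool × Option Int × Bool × List (Bool × Bool × Int) :=
  let (stFirst, prev, havePrev, _cur, _haveCur, acc) := s
  let cur : Option Int := some x
  if !havePrev then
    -- no `prev` yet: take `cur` as `prev` and continue
    (stFirst, cur, true, cur, true, acc)
  else
    -- yield first(), False, prev; prev = cur   (first() reads and clears the flag)
    (false, cur, true, cur, true, acc ++ [(stFirst, false, prev.getD 0)])

def with_first_last (xs : List Int) : List (Bool × Bool × Int) :=
  let s := xs.foldl aStep (true, none, false, none, false, [])
  let (stFirst, _prev, _havePrev, cur, haveCur, acc) := s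
  if haveCur then acc ++ [(stFirst, true, cur.getD 0)] else acc

-- ===== PORT B =====
-- B: n = len(xs); for i, x in enumerate(xs): yield i == 0, i == n - 1, x
def with_first_last_alt (xs : List Int) : List (Bool × Bool × Int) :=
  let n : Int := xs.length
  (PySem.List.enumerate xs).map (fun p => (p.1 == 0, p.1 == n - 1, p.2))

-- ===== PRECONDITION & SPEC =====
def Spec_with_first_last (xs : List Int) (out : List (Bool × Bool × Int)) : Prop := out = with_first_last_alt xs
instance (xs : List Int) (out : List (Bool × Bool × Int)) : Decidable (Spec_with_first_last xs out) := by unfold Spec_with_first_last; infer_instance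

-- ===== CLAIM (what is proved, stated in full; the proofs are below) =====
def Claim_equal_with_first_last : Prop := ∀ (xs : List Int), Dom_with_first_last xs → Spec_with_first_last xs (with_first_last xs)

-- ===== LEMMAS AND PROOFS =====
-- Proof-side characterization of both programs' output once the first element is in hand.
def wflGo (first : Bool) (prev : Int) : List Int → List (Bool × Bool × Int)
  | [] => [(first, true, prev)]
  | c :: rest => (first, false, prev) :: wflGo false c rest

-- Loop invariant of A: once a `prev` is in hand, A's remaining fold + final yield produces exactly wflGo.
theorem aGo_eq_wflGo (rest : List Int) : ∀ (stFirst : Bool) (p : Int) (acc : List (Bool × Bool × Int)),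
    (let s := rest.foldl aStep (stFirst, some p, true, some p, true, acc)
     let (stFirst', _, _, cur, haveCur, acc') := s
     if haveCur then acc' ++ [(stFirst', true, cur.getD 0)] else acc')
    = acc ++ wflGo stFirst p rest := by
  induction rest with
  | nil => intro stFirst p acc; simp [wflGo]
  | cons c rest ih =>
      intro stFirst p acc
      simpa [aStep, wflGo, List.append_assoc] using ih false c (acc ++ [(stFirst, false, p)])

-- B's enumerate-map equals wflGo when the index bookkeeping is in range.
theorem enum_eq_wflGo (rest : List Int) : ∀ (s p n : Int), 0 ≤ s → s + 1 + rest.length = n →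
    (PySem.List.enumerate (p :: rest) s).map (fun q => (q.1 == 0, q.1 == n - 1, q.2))
      = wflGo (s == 0) p rest := by
  induction rest with
  | nil =>
      intro s p n hs hn
      push_cast [List.length_nil] at hn
      simp [PySem.List.enumerate_cons, PySem.List.enumerate_nil, wflGo]
      omega
  | cons c rest ih =>
      intro s p n hs hn
      push_cast [List.length_cons] at hn
      simp only [PySem.List.enumerate_cons, List.map_cons, wflGo]
      have h1 : (s == n - 1) = false := by simp; omega
      have h2 : (s + 1 == 0) = false := by simp; omega
      rw [h1]
      have hih := ih (s + 1) c n (by omega) (by push_cast; omega)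
      rw [h2] at hih
      simp only [PySem.List.enumerate_cons, List.map_cons] at hih
      exact congrArg (List.cons _) hih

-- ===== VERDICT (by name: the statement is the Claim_ definition above) =====
theorem with_first_last_spec : Claim_equal_with_first_last := by
  intro xs _
  unfold Spec_with_first_last
  cases xs with
  | nil => rfl
  | cons x rest =>
      have hA : with_first_last (x :: rest) = wflGo true x rest := by
        show (let s := rest.foldl aStep (aStep (true, none, false, none, false, []) x)
              let (stFirst', _, _, cur, haveCur, acc') := s
              if haveCur then acc' ++ [(stFirst', true, cur.getD 0)] else acc') = wflGo true x rest
        simpa [aStep] using aGo_eq_wflGo rest true x []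
      have hB : with_first_last_alt (x :: rest) = wflGo true x rest := by
        have := enum_eq_wflGo rest 0 x ((x :: rest).length : Int) le_rfl (by push_cast [List.length_cons]; omega)
        simpa [with_first_last_alt] using this
      rw [hA, hB]
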